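-- pv_equiv track=rewrite | github.com/weiyinfu/Majiang | majiang/30-数学元素周期表.py | solve
-- ===== SOURCE A (Python) =====
-- di = {}
--
-- def solve(n_unary, n_binary_swap, n_binary_non_swap, n_operand, n_operator, depth):
--     """
--     n_unary:一元运算符的个数
--     n_binary_swap:二元可交换运算符的个数
--     n_binary_non_swap:二元不可交换运算符的个数
--     n_operand:操作数的个数
--     n_operator:操作符的个数
--     depth:表达式树的深度
--     """
--     params = n_unary, n_binary_swap, n_binary_non_swap, n_operand, n_operator, depth
--     for i in params:
--         assert i >= 0
--     if params in di:
--         return di[params]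
--     if n_operator == 0:
--         # 没有可用运算符了，直接返回运算数
--         return n_operand
--     if depth == 0:
--         # 如果深度为0，不能再向下扩展了
--         return 0
--     s = 0
--     swapable = 0  # 可交换运算符的累积和，此数最后需要除以2
--     # 如果是二元运算符
--     for left in range(n_operator):
--         left_count = solve(n_unary, n_binary_swap, n_binary_non_swap, n_operand, left, depth - 1)
--         right_count = solve(n_unary, n_binary_swap, n_binary_non_swap, n_operand, n_operator - 1 - left, depth - 1)
--         # 如果是可交换运算
--         # 需要考虑左右两部分的等价性
--         swapable += left_count * right_count * n_binary_swap
--         # 如果是不可交换运算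
--         s += left_count * right_count * n_binary_non_swap
--     assert swapable % 2 == 0
--     s += swapable // 2
--     # 如果是一元运算符
--     s += solve(n_unary, n_binary_swap, n_binary_non_swap, n_operand, n_operator - 1, depth - 1) * n_unary
--     di[params] = s
--     return s
-- ===== SOURCE B (Python) =====
-- def solve(n_unary, n_binary_swap, n_binary_non_swap, n_operand, n_operator, depth):
--     for i in (n_unary, n_binary_swap, n_binary_non_swap, n_operand, n_operator, depth):
--         assert i >= 0
--     if n_operator == 0:
--         return n_operand
--     if depth == 0:
--         return 0
--     # bottom-up DP: prev[m] = number of trees using exactly m operators, depth limit d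
--     prev = [n_operand] + [0] * n_operator
--     for _ in range(depth - 1):
--         cur = [n_operand] * (n_operator + 1)
--         for m in range(1, n_operator + 1):
--             C = sum(prev[l] * prev[m - 1 - l] for l in range(m))
--             cur[m] = n_binary_non_swap * C + (n_binary_swap * C) // 2 + n_unary * prev[m - 1]
--         prev = cur
--     # only the single top cell is needed from the last level
--     C = sum(prev[l] * prev[n_operator - 1 - l] for l in range(n_operator))
--     return n_binary_non_swap * C + (n_binary_swap * C) // 2 + n_unary * prev[n_operator - 1]
-- ===== Notes on version B (the rewrite author's own statement) =====
-- stated objective: alternative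
-- what changed: replaces the memoized top-down recursion over (n_operator, depth) states with an explicit bottom-up dynamic-programming table built row by row over depth
import Mathlib
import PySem

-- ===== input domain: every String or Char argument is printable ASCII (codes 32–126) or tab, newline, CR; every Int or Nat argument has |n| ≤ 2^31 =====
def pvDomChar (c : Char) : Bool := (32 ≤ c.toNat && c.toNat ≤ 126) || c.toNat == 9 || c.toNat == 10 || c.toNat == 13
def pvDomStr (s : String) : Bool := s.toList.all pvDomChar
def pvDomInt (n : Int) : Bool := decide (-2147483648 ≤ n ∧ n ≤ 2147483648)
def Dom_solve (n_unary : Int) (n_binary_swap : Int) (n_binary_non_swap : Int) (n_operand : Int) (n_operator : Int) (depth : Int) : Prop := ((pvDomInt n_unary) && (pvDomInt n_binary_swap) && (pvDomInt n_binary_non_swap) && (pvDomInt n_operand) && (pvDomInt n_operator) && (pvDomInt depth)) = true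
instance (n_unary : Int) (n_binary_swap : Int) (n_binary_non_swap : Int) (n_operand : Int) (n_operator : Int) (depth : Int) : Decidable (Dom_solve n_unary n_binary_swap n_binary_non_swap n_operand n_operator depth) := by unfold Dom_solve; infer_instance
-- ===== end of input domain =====

-- B replaces A's memoized top-down recursion by a bottom-up DP table (alternative decomposition, same cost).

-- ===== PORT A =====
-- Literal port of A's recursion (the memo dict `di` only caches values and never
-- changes them, so the port is the bare recursion; the asserts are excluded by Pre_).
-- All three recursive calls decrease `depth` by exactly 1, so the recursion is on depth : Nat.
def solveRec (nu nbs nbn nop : Int) (d : Nat) (m : Int) : Int :=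
    if m = 0 then nop
    else
      match d with
      | 0 => 0
      | d' + 1 =>
        -- for left in range(n_operator): accumulate (swapable, s)
        let acc : Int × Int := (PySem.List.pyRange 0 m 1).foldl
          (fun acc left =>
            let lc := solveRec nu nbs nbn nop d' left
            let rc := solveRec nu nbs nbn nop d' (m - 1 - left)
            (acc.1 + lc * rc * nbs, acc.2 + lc * rc * nbn))
          (0, 0)
        acc.2 + PySem.Int.floordiv acc.1 2 + solveRec nu nbs nbn nop d' (m - 1) * nu

def solve (n_unary : Int) (n_binary_swap : Int) (n_binary_non_swap : Int) (n_operand : Int) (n_operator : Int) (depth : Int) : Int :=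
  solveRec n_unary n_binary_swap n_binary_non_swap n_operand depth.toNat n_operator

-- ===== PORT B =====
-- one row of the table: cur = [n_operand]*(M+1); cur[m] = ... for m in 1..M
-- (Python lists are O(1)-indexed, so rows are Arrays)
def altRow (nu nbs nbn nop : Int) (M : Nat) (prev : Array Int) : Array Int :=
  ((List.range (M + 1)).map (fun m =>
    if m = 0 then nop
    else
      let C := ((List.range m).map (fun l => prev.getD l 0 * prev.getD (m - 1 - l) 0)).sum
      nbn * C + PySem.Int.floordiv (nbs * C) 2 + nu * prev.getD (m - 1) 0)).toArray

def solve_alt (n_unary : Int) (n_binary_swap : Int) (n_binary_non_swap : Int) (n_operand : Int) (n_operator : Int) (depth : Int) : Int :=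
  if n_operator = 0 then n_operand
  else if depth = 0 then 0
  else
    let M := n_operator.toNat
    let prev := (List.range (depth.toNat - 1)).foldl
      (fun prev _ => altRow n_unary n_binary_swap n_binary_non_swap n_operand M prev)
      ((n_operand :: List.replicate M 0).toArray)
    let C := ((List.range M).map (fun l => prev.getD l 0 * prev.getD (M - 1 - l) 0)).sum
    n_binary_non_swap * C + PySem.Int.floordiv (n_binary_swap * C) 2 + n_unary * prev.getD (M - 1) 0

-- ===== PRECONDITION & SPEC =====
-- Pre_ excludes exactly the inputs on which Python A raises AssertionError: any negative
-- argument (assert i >= 0), and the inputs with n_binary_swap and n_operand both odd on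
-- which the recursion reaches a state where `assert swapable % 2 == 0` fails (all of them
-- except n_operator = 0, depth = 0, or depth = 1 with n_operator ≠ 1).
def Pre_solve (n_unary : Int) (n_binary_swap : Int) (n_binary_non_swap : Int) (n_operand : Int) (n_operator : Int) (depth : Int) : Prop :=
  0 ≤ n_unary ∧ 0 ≤ n_binary_swap ∧ 0 ≤ n_binary_non_swap ∧ 0 ≤ n_operand ∧ 0 ≤ n_operator ∧ 0 ≤ depth ∧
  (n_binary_swap % 2 = 0 ∨ n_operand % 2 = 0 ∨ n_operator = 0 ∨ depth = 0 ∨ (depth = 1 ∧ n_operator ≠ 1))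
instance (n_unary : Int) (n_binary_swap : Int) (n_binary_non_swap : Int) (n_operand : Int) (n_operator : Int) (depth : Int) : Decidable (Pre_solve n_unary n_binary_swap n_binary_non_swap n_operand n_operator depth) := by unfold Pre_solve; infer_instance
def pvWitness_solve : Int × Int × Int × Int × Int × Int := (2, 1, 3, 4, 3, 2)

def Spec_solve (n_unary : Int) (n_binary_swap : Int) (n_binary_non_swap : Int) (n_operand : Int) (n_operator : Int) (depth : Int) (out : Int) : Prop := out = solve_alt n_unary n_binary_swap n_binary_non_swap n_operand n_operator depth
instance (n_unary : Int) (n_binary_swap : Int) (n_binary_non_swap : Int) (n_operand : Int) (n_operator : Int) (depth : Int) (out : Int) : Decidable (Spec_solve n_unary n_binary_swap n_binary_non_swap n_operand n_operator depth out) := by unfold Spec_solve; infer_instance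

-- ===== CLAIM (what is proved, stated in full; the proofs are below) =====
def Claim_equal_solve : Prop := ∀ (n_unary : Int) (n_binary_swap : Int) (n_binary_non_swap : Int) (n_operand : Int) (n_operator : Int) (depth : Int), Dom_solve n_unary n_binary_swap n_binary_non_swap n_operand n_operator depth → Pre_solve n_unary n_binary_swap n_binary_non_swap n_operand n_operator depth → Spec_solve n_unary n_binary_swap n_binary_non_swap n_operand n_operator depth (solve n_unary n_binary_swap n_binary_non_swap n_operand n_operator depth)
-- ===== LEMMAS AND PROOFS =====

theorem getD_toArray (xs : List Int) (i : Nat) (d : Int) :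
    xs.toArray.getD i d = xs.getD i d := by
  simp [Array.getD, List.getD_eq_getElem?_getD]
  split
  · rename_i h
    simp [List.getElem?_eq_getElem (by simpa using h)]
  · rename_i h
    simp [List.getElem?_eq_none (by simpa using Nat.le_of_not_lt h)]

theorem getD_map_range' (f : Nat → Int) (n i : Nat) (h : i < n) :
    ((List.range n).map f).getD i 0 = f i := by
  simp [List.getD_eq_getElem?_getD, h]

theorem getD_arr_map_range (f : Nat → Int) (n i : Nat) (h : i < n) :
    ((List.range n).map f).toArray.getD i 0 = f i := by
  rw [getD_toArray, getD_map_range' f n i h]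

theorem foldl_pair_sum (nbs nbn : Int) (g : Nat → Int) (l : List Nat) (a b : Int) :
    l.foldl (fun acc k => (acc.1 + g k * nbs, acc.2 + g k * nbn)) (a, b)
      = (a + (l.map g).sum * nbs, b + (l.map g).sum * nbn) := by
  induction l generalizing a b with
  | nil => simp
  | cons x t ih => simp [ih]; constructor <;> ring

theorem solveRec_m_zero (nu nbs nbn nop : Int) (d : Nat) :
    solveRec nu nbs nbn nop d 0 = nop := by
  rw [solveRec.eq_def]; simp

theorem solveRec_zero (nu nbs nbn nop m : Int) :
    solveRec nu nbs nbn nop 0 m = if m = 0 then nop else 0 := by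
  rw [solveRec.eq_def]

theorem solveRec_succ_eq (nu nbs nbn nop : Int) (d : Nat) (m : Nat) (hm : m ≠ 0) :
    solveRec nu nbs nbn nop (d + 1) (m : Int)
      = nbn * ((List.range m).map (fun (l : Nat) =>
            solveRec nu nbs nbn nop d (l : Int) * solveRec nu nbs nbn nop d ((m - 1 - l : Nat) : Int))).sum
        + PySem.Int.floordiv (nbs * ((List.range m).map (fun (l : Nat) =>
            solveRec nu nbs nbn nop d (l : Int) * solveRec nu nbs nbn nop d ((m - 1 - l : Nat) : Int))).sum) 2
        + nu * solveRec nu nbs nbn nop d ((m - 1 : Nat) : Int) := by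
  rw [solveRec.eq_def]
  have hm' : ((m : Int) = 0) = False := by
    simp; exact_mod_cast hm
  rw [PySem.List.pyRange_one]
  simp only [hm', if_false, sub_zero, Int.toNat_natCast, List.foldl_map]
  rw [foldl_pair_sum nbs nbn (fun k => solveRec nu nbs nbn nop d (0 + (k : Int)) * solveRec nu nbs nbn nop d ((m : Int) - 1 - (0 + (k : Int))))]
  have hmap : ((List.range m).map (fun (k : Nat) => solveRec nu nbs nbn nop d (0 + (k : Int)) * solveRec nu nbs nbn nop d ((m : Int) - 1 - (0 + (k : Int))))).sum
      = ((List.range m).map (fun (l : Nat) => solveRec nu nbs nbn nop d (l : Int) * solveRec nu nbs nbn nop d ((m - 1 - l : Nat) : Int))).sum := by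
    apply congrArg
    apply List.map_congr_left
    intro l hl
    have hl' : l < m := List.mem_range.mp hl
    have h1 : (0 : Int) + (l : Int) = (l : Int) := by ring
    have h2 : ((m : Int) - 1 - (0 + (l : Int))) = ((m - 1 - l : Nat) : Int) := by omega
    rw [h2, h1]
  have h3 : ((m : Int) - 1) = ((m - 1 : Nat) : Int) := by omega
  rw [hmap, h3]
  ring_nf

-- the table cell for m operators, read off a row holding the depth-d values
theorem cell_eq (nu nbs nbn nop : Int) (d M m : Nat) (hm : m ≠ 0) (hmM : m < M + 1) :
    nbn * ((List.range m).map (fun l =>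
        ((List.range (M + 1)).map (fun (i : Nat) => solveRec nu nbs nbn nop d (i : Int))).toArray.getD l 0
          * ((List.range (M + 1)).map (fun (i : Nat) => solveRec nu nbs nbn nop d (i : Int))).toArray.getD (m - 1 - l) 0)).sum
      + PySem.Int.floordiv (nbs * ((List.range m).map (fun l =>
        ((List.range (M + 1)).map (fun (i : Nat) => solveRec nu nbs nbn nop d (i : Int))).toArray.getD l 0
          * ((List.range (M + 1)).map (fun (i : Nat) => solveRec nu nbs nbn nop d (i : Int))).toArray.getD (m - 1 - l) 0)).sum) 2
      + nu * ((List.range (M + 1)).map (fun (i : Nat) => solveRec nu nbs nbn nop d (i : Int))).toArray.getD (m - 1) 0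
    = solveRec nu nbs nbn nop (d + 1) (m : Int) := by
  rw [solveRec_succ_eq nu nbs nbn nop d m hm]
  have hC : ((List.range m).map (fun l =>
        ((List.range (M + 1)).map (fun (i : Nat) => solveRec nu nbs nbn nop d (i : Int))).toArray.getD l 0
          * ((List.range (M + 1)).map (fun (i : Nat) => solveRec nu nbs nbn nop d (i : Int))).toArray.getD (m - 1 - l) 0)).sum
      = ((List.range m).map (fun (l : Nat) =>
          solveRec nu nbs nbn nop d (l : Int) * solveRec nu nbs nbn nop d ((m - 1 - l : Nat) : Int))).sum := by
    apply congrArg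
    apply List.map_congr_left
    intro l hl
    have hl' : l < m := List.mem_range.mp hl
    rw [getD_arr_map_range _ _ l (by omega), getD_arr_map_range _ _ (m - 1 - l) (by omega)]
  rw [hC, getD_arr_map_range _ _ (m - 1) (by omega)]

theorem base_row_eq (nu nbs nbn nop : Int) (M : Nat) :
    (nop : Int) :: List.replicate M 0
      = (List.range (M + 1)).map (fun (i : Nat) => solveRec nu nbs nbn nop 0 (i : Int)) := by
  apply List.ext_getElem
  · simp
  · intro i h1 h2
    simp only [List.getElem_map, List.getElem_range, solveRec_zero]
    cases i with
    | zero => simp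
    | succ j =>
      have hne : ((j + 1 : Nat) : Int) ≠ 0 := by omega
      simp only [List.getElem_cons_succ, List.getElem_replicate, if_neg hne]

theorem row_step_eq (nu nbs nbn nop : Int) (M d : Nat) :
    altRow nu nbs nbn nop M ((List.range (M + 1)).map (fun (i : Nat) => solveRec nu nbs nbn nop d (i : Int))).toArray
      = ((List.range (M + 1)).map (fun (i : Nat) => solveRec nu nbs nbn nop (d + 1) (i : Int))).toArray := by
  unfold altRow
  apply congrArg List.toArray
  apply List.map_congr_left
  intro m hm
  have hmM : m < M + 1 := List.mem_range.mp hm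
  by_cases h0 : m = 0
  · subst h0
    simp [solveRec_m_zero]
  · simp only [h0, if_false]
    exact cell_eq nu nbs nbn nop d M m h0 hmM

theorem table_eq (nu nbs nbn nop : Int) (M : Nat) (d : Nat) :
    (List.range d).foldl (fun prev _ => altRow nu nbs nbn nop M prev) ((nop : Int) :: List.replicate M 0).toArray
      = ((List.range (M + 1)).map (fun (i : Nat) => solveRec nu nbs nbn nop d (i : Int))).toArray := by
  induction d with
  | zero => simpa using congrArg List.toArray (base_row_eq nu nbs nbn nop M)
  | succ d ih =>
    rw [List.range_succ, List.foldl_append, ih]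
    simpa using row_step_eq nu nbs nbn nop M d

-- ===== VERDICT (by name: the statement is the Claim_ definition above) =====
theorem solve_spec : Claim_equal_solve := by
  intro nu nbs nbn nop m d _ hpre
  obtain ⟨_, _, _, _, hm, hd, _⟩ := hpre
  unfold Spec_solve solve solve_alt
  by_cases h0 : m = 0
  · subst h0; simp [solveRec_m_zero]
  · simp only [h0, if_false]
    by_cases hd0 : d = 0
    · subst hd0; simp [solveRec_zero, h0]
    · simp only [hd0, if_false]
      rw [table_eq]
      have hM : m.toNat ≠ 0 := by omega
      have hk : d.toNat - 1 + 1 = d.toNat := by omega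
      have := cell_eq nu nbs nbn nop (d.toNat - 1) m.toNat m.toNat hM (by omega)
      rw [hk] at this
      rw [this]
      congr 1
      omega
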